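-- pv_equiv track=rewrite | github.com/SimplyCoding-afk/GUI | image_processing/color_thickness.py | map_color_to_thickness
-- ===== SOURCE A (Python) =====
-- def map_color_to_thickness(h):
--     color_map = [
--         ((0, 15), "brown", 700),
--         ((15, 30), "yellow/orange", 2000),
--         ((30, 60), "yellow-green", 3700),
--         ((60, 90), "green", 3500),
--         ((90, 120), "blue-green", 5000),
--         ((120, 140), "blue", 3100),
--         ((140, 170), "violet", 1000),
--         ((170, 180), "red-violet", 2500),
--     ]
--
--     for (low, high), name, thickness in color_map:
--         if low <= h <= high:
--             return name, thickness
--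
--     return "Unknown", None
-- ===== SOURCE B (Python) =====
-- import bisect
--
-- _HIGHS = [15, 30, 60, 90, 120, 140, 170, 180]
-- _NAMES = ["brown", "yellow/orange", "yellow-green", "green",
--           "blue-green", "blue", "violet", "red-violet"]
-- _THICK = [700, 2000, 3700, 3500, 5000, 3100, 1000, 2500]
--
-- def map_color_to_thickness(h):
--     if h < 0 or h > 180:
--         return "Unknown", None
--     i = bisect.bisect_left(_HIGHS, h)
--     return _NAMES[i], _THICK[i]
-- ===== Notes on version B (the rewrite author's own statement) =====
-- stated objective: idiomatic
-- what changed: Replaces the linear first-match scan over (low,high) range triples by a single out-of-range check plus bisect_left over a table of upper boundaries with parallel name/thickness lists.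
import Mathlib
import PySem

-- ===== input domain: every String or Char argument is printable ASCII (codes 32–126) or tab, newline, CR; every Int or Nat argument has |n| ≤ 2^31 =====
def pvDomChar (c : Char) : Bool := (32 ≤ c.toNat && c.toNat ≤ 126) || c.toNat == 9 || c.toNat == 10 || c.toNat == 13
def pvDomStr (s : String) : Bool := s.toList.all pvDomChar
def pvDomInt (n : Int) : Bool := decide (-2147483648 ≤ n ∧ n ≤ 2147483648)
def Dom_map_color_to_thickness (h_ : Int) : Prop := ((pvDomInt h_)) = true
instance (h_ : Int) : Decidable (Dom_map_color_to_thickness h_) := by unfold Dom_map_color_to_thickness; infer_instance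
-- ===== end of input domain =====

-- B replaces A's linear scan over (low, high) ranges by a bisect_left lookup in a table of upper bounds (idiomatic table-driven form).

-- ===== PORT A =====
-- A's color_map literal
def pvColorMap : List ((Int × Int) × String × Int) :=
  [((0, 15), "brown", 700),
   ((15, 30), "yellow/orange", 2000),
   ((30, 60), "yellow-green", 3700),
   ((60, 90), "green", 3500),
   ((90, 120), "blue-green", 5000),
   ((120, 140), "blue", 3100),
   ((140, 170), "violet", 1000),
   ((170, 180), "red-violet", 2500)]

-- the for-loop with early return
def pvLoopA (h_ : Int) : List ((Int × Int) × String × Int) → String × Option Int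
  | [] => ("Unknown", none)
  | ((low, high), name, thickness) :: rest =>
      if low ≤ h_ ∧ h_ ≤ high then (name, some thickness) else pvLoopA h_ rest

def map_color_to_thickness (h_ : Int) : String × Option Int :=
  pvLoopA h_ pvColorMap

-- ===== PORT B =====
def pvHighs : List Int := [15, 30, 60, 90, 120, 140, 170, 180]
def pvNames : List String :=
  ["brown", "yellow/orange", "yellow-green", "green", "blue-green", "blue", "violet", "red-violet"]
def pvThick : List Int := [700, 2000, 3700, 3500, 5000, 3100, 1000, 2500]

def map_color_to_thickness_alt (h_ : Int) : String × Option Int :=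
  if h_ < 0 ∨ h_ > 180 then ("Unknown", none)
  else
    let i := PySem.List.bisectLeft pvHighs h_
    (pvNames.getD i "Unknown", some (pvThick.getD i 0))

-- ===== PRECONDITION & SPEC =====
def Spec_map_color_to_thickness (h_ : Int) (out : String × Option Int) : Prop := out = map_color_to_thickness_alt h_
instance (h_ : Int) (out : String × Option Int) : Decidable (Spec_map_color_to_thickness h_ out) := by unfold Spec_map_color_to_thickness; infer_instance

-- ===== CLAIM (what is proved, stated in full; the proofs are below) =====
def Claim_equal_map_color_to_thickness : Prop := ∀ (h_ : Int), Dom_map_color_to_thickness h_ → Spec_map_color_to_thickness h_ (map_color_to_thickness h_)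

-- ===== LEMMAS AND PROOFS =====

-- value of B's bisect_left on each interval of the table
theorem pvBisect0 {h_ : Int} (h1 : 0 ≤ h_) (h2 : h_ ≤ 15) : PySem.List.bisectLeft pvHighs h_ = 0 := by
  unfold pvHighs PySem.List.bisectLeft
  repeat' (first | omega | (unfold PySem.List.bisectLeftLoop; norm_num; try split_ifs <;> try omega))

theorem pvBisect1 {h_ : Int} (h1 : 15 < h_) (h2 : h_ ≤ 30) : PySem.List.bisectLeft pvHighs h_ = 1 := by
  unfold pvHighs PySem.List.bisectLeft
  repeat' (first | omega | (unfold PySem.List.bisectLeftLoop; norm_num; try split_ifs <;> try omega))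

theorem pvBisect2 {h_ : Int} (h1 : 30 < h_) (h2 : h_ ≤ 60) : PySem.List.bisectLeft pvHighs h_ = 2 := by
  unfold pvHighs PySem.List.bisectLeft
  repeat' (first | omega | (unfold PySem.List.bisectLeftLoop; norm_num; try split_ifs <;> try omega))

theorem pvBisect3 {h_ : Int} (h1 : 60 < h_) (h2 : h_ ≤ 90) : PySem.List.bisectLeft pvHighs h_ = 3 := by
  unfold pvHighs PySem.List.bisectLeft
  repeat' (first | omega | (unfold PySem.List.bisectLeftLoop; norm_num; try split_ifs <;> try omega))

theorem pvBisect4 {h_ : Int} (h1 : 90 < h_) (h2 : h_ ≤ 120) : PySem.List.bisectLeft pvHighs h_ = 4 := by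
  unfold pvHighs PySem.List.bisectLeft
  repeat' (first | omega | (unfold PySem.List.bisectLeftLoop; norm_num; try split_ifs <;> try omega))

theorem pvBisect5 {h_ : Int} (h1 : 120 < h_) (h2 : h_ ≤ 140) : PySem.List.bisectLeft pvHighs h_ = 5 := by
  unfold pvHighs PySem.List.bisectLeft
  repeat' (first | omega | (unfold PySem.List.bisectLeftLoop; norm_num; try split_ifs <;> try omega))

theorem pvBisect6 {h_ : Int} (h1 : 140 < h_) (h2 : h_ ≤ 170) : PySem.List.bisectLeft pvHighs h_ = 6 := by
  unfold pvHighs PySem.List.bisectLeft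
  repeat' (first | omega | (unfold PySem.List.bisectLeftLoop; norm_num; try split_ifs <;> try omega))

theorem pvBisect7 {h_ : Int} (h1 : 170 < h_) (h2 : h_ ≤ 180) : PySem.List.bisectLeft pvHighs h_ = 7 := by
  unfold pvHighs PySem.List.bisectLeft
  repeat' (first | omega | (unfold PySem.List.bisectLeftLoop; norm_num; try split_ifs <;> try omega))

-- ===== VERDICT (by name: the statement is the Claim_ definition above) =====
theorem map_color_to_thickness_spec : Claim_equal_map_color_to_thickness := by
  intro h_ _
  unfold Spec_map_color_to_thickness map_color_to_thickness map_color_to_thickness_alt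
  simp only [pvColorMap, pvLoopA]
  split_ifs <;>
  first
    | (exfalso; omega)
    | (rw [pvBisect0 (by omega) (by omega)]; rfl)
    | (rw [pvBisect1 (by omega) (by omega)]; rfl)
    | (rw [pvBisect2 (by omega) (by omega)]; rfl)
    | (rw [pvBisect3 (by omega) (by omega)]; rfl)
    | (rw [pvBisect4 (by omega) (by omega)]; rfl)
    | (rw [pvBisect5 (by omega) (by omega)]; rfl)
    | (rw [pvBisect6 (by omega) (by omega)]; rfl)
    | (rw [pvBisect7 (by omega) (by omega)]; rfl)
    | rfl
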